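-- pv_equiv track=rewrite | github.com/roy-marquez/_IntroProg | s10/Tarea/user_interface.py | is_positive_integer
-- ===== SOURCE A (Python) =====
-- def is_positive_integer(user_str):
--     '''Función que determina si un string contiene unicamente carácteres numéricos'''
--     is_int = True
--     allowed_chars = ['0','1','2','3','4','5','6','7','8','9']
--     for char in user_str:
--         if allowed_chars.count(char) < 1:
--             is_int = False
--             break
--     return is_int
-- ===== SOURCE B (Python) =====
-- def is_positive_integer(user_str):
--     '''Extrema-based check: since the digits form a contiguous code-point range,
--     a string is all-digits iff its smallest character is >= '0' and its largest
--     character is <= '9'. Only the two extremes are compared against the range.'''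
--     if not user_str:
--         return True
--     return '0' <= min(user_str) and max(user_str) <= '9'
-- ===== Notes on version B (the rewrite author's own statement) =====
-- stated objective: alternative
-- what changed: Instead of testing every character for digit membership with an early-break loop, B computes the string's minimum and maximum characters and compares only those two extremes against the contiguous range '0'..'9'.
import Mathlib
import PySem

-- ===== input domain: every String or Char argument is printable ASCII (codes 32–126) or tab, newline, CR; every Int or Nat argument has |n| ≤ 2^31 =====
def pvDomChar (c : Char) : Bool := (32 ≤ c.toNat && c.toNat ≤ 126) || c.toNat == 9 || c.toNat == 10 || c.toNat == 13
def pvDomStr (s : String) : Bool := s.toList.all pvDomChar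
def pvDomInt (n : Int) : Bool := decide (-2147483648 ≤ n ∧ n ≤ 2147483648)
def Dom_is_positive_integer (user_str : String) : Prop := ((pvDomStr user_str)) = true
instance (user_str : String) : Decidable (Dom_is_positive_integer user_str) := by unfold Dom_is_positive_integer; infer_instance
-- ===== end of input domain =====

-- B replaces A's per-character membership loop by an extrema test: only min and max of the
-- string are compared against the contiguous digit range '0'..'9'; objective: alternative.

-- ===== PORT A =====
def pvAllowedChars : List Char := ['0','1','2','3','4','5','6','7','8','9']

-- the 'for char in user_str' loop: early 'break' ports as returning false immediately
def pvLoopA : List Char → Bool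
  | [] => true
  | c :: rest => if PySem.List.count pvAllowedChars c < 1 then false else pvLoopA rest

def is_positive_integer (user_str : String) : Bool := pvLoopA user_str.toList

-- ===== PORT B =====
def is_positive_integer_alt (user_str : String) : Bool :=
  if user_str.toList = [] then true
  else
    match PySem.List.min? user_str.toList (fun c => c),
          PySem.List.max? user_str.toList (fun c => c) with
    | some mn, some mx => decide ('0' ≤ mn) && decide (mx ≤ '9')
    | _, _ => true  -- unreachable: the string is nonempty

-- ===== PRECONDITION & SPEC =====
def Spec_is_positive_integer (user_str : String) (out : Bool) : Prop := out = is_positive_integer_alt user_str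
instance (user_str : String) (out : Bool) : Decidable (Spec_is_positive_integer user_str out) := by unfold Spec_is_positive_integer; infer_instance

-- ===== CLAIM =====
def Claim_equal_is_positive_integer : Prop := ∀ (user_str : String), Dom_is_positive_integer user_str → Spec_is_positive_integer user_str (is_positive_integer user_str)

-- ===== LEMMAS AND PROOFS =====

theorem pvLoopA_iff (l : List Char) : pvLoopA l = true ↔ ∀ c ∈ l, c ∈ pvAllowedChars := by
  induction l with
  | nil => simp [pvLoopA]
  | cons c rest ih =>
    simp only [pvLoopA, PySem.List.count_eq]
    by_cases h : c ∈ pvAllowedChars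
    · have h1 : 0 < pvAllowedChars.count c := List.count_pos_iff.mpr h
      simp [ih, h]
      omega
    · have h0 : pvAllowedChars.count c = 0 := List.count_eq_zero_of_not_mem h
      simp [h0, h]

theorem pvMemAllowed (c : Char) : c ∈ pvAllowedChars ↔ ('0' ≤ c ∧ c ≤ '9') := by
  have hle : ∀ a b : Char, (a ≤ b) ↔ a.toNat ≤ b.toNat := by
    intro a b
    rfl
  constructor
  · intro h
    fin_cases h <;> simp [hle]
  · rintro ⟨h0, h9⟩
    rw [hle] at h0 h9
    have h48 : ('0' : Char).toNat = 48 := by decide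
    have h57 : ('9' : Char).toNat = 57 := by decide
    rw [h48] at h0; rw [h57] at h9
    have : c.toNat = 48 ∨ c.toNat = 49 ∨ c.toNat = 50 ∨ c.toNat = 51 ∨ c.toNat = 52 ∨
           c.toNat = 53 ∨ c.toNat = 54 ∨ c.toNat = 55 ∨ c.toNat = 56 ∨ c.toNat = 57 := by omega
    have hofNat : Char.ofNat c.toNat = c := Char.ofNat_toNat c
    rcases this with h|h|h|h|h|h|h|h|h|h <;>
      (rw [h] at hofNat; rw [← hofNat]; decide)

-- ===== VERDICT =====
theorem is_positive_integer_spec : Claim_equal_is_positive_integer := by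
  intro s _
  unfold Spec_is_positive_integer is_positive_integer is_positive_integer_alt
  by_cases hnil : s.toList = []
  · simp [hnil, pvLoopA]
  · simp only [hnil, ite_false]
    rcases hmn : PySem.List.min? s.toList (fun c => c) with _ | mn
    · exact absurd ((PySem.List.min?_eq_none_iff _ _).mp hmn) hnil
    rcases hmx : PySem.List.max? s.toList (fun c => c) with _ | mx
    · exact absurd ((PySem.List.max?_eq_none_iff _ _).mp hmx) hnil
    rw [Bool.eq_iff_iff, pvLoopA_iff]
    simp only [Bool.and_eq_true, decide_eq_true_eq]
    constructor
    · intro h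
      have hmnm := PySem.List.min?_mem hmn
      have hmxm := PySem.List.max?_mem hmx
      exact ⟨((pvMemAllowed mn).mp (h mn hmnm)).1, ((pvMemAllowed mx).mp (h mx hmxm)).2⟩
    · rintro ⟨h0, h9⟩ c hc
      exact (pvMemAllowed c).mpr
        ⟨le_trans h0 (PySem.List.min?_isMin hmn c hc),
         le_trans (PySem.List.max?_isMax hmx c hc) h9⟩
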